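-- pv_equiv track=rewrite | github.com/ralskwo/CodingTest | BAEKJOON/1744 - 수 묶기/수 묶기.py | max_sequence_sum
-- ===== SOURCE A (Python) =====
-- def max_sequence_sum(nums):
--     positive = []  # 양수를 저장할 리스트
--     negative = []  # 음수와 0을 저장할 리스트
--     result = 0  # 최종 결과를 저장할 변수
--
--     for num in nums:  # 입력 받은 숫자들을 하나씩 확인
--         if num > 1:  # 1보다 큰 양수는 positive 리스트에 추가
--             positive.append(num)
--         elif num == 1:  # 1은 묶지 않고 결과에 바로 더함
--             result += 1
--         else:  # 0과 음수는 negative 리스트에 추가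
--             negative.append(num)
--
--     positive.sort(reverse=True)  # 양수는 큰 것부터 곱하기 위해 내림차순 정렬
--     negative.sort()  # 음수는 작은 것부터 곱하기 위해 오름차순 정렬
--
--     i = 0  # 양수 리스트의 인덱스를 관리할 변수
--     while i < len(positive) - 1:  # 두 개씩 묶어서 곱하기
--         result += (
--             positive[i] * positive[i + 1]
--         )  # 양수 두 개를 묶어 곱한 값을 결과에 추가
--         i += 2  # 두 개씩 묶었으므로 인덱스를 2 증가시킴
--     if i < len(positive):  # 묶지 못하고 남은 양수가 있으면 그대로 더하기
--         result += positive[i]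
--
--     i = 0  # 음수 리스트의 인덱스를 관리할 변수
--     while i < len(negative) - 1:  # 두 개씩 묶어서 곱하기
--         result += (
--             negative[i] * negative[i + 1]
--         )  # 음수 두 개를 묶어 곱한 값을 결과에 추가
--         i += 2  # 두 개씩 묶었으므로 인덱스를 2 증가시킴
--     if i < len(negative):  # 묶지 못하고 남은 음수가 있으면
--         if 0 in nums:  # 0이 있을 경우, 음수와 0을 묶어 결과에 0을 더함 (음수 상쇄)
--             result += 0
--         else:  # 0이 없으면 남은 음수를 결과에 그대로 더함
--             result += negative[i]
--
--     return result  # 최종 결과 반환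
-- ===== SOURCE B (Python) =====
-- def max_sequence_sum(nums):
--     s = sorted(nums)
--     n = len(s)
--     total = 0
--     i = 0
--     # pair up the most-negative elements among the non-positives (zeros included)
--     while i + 1 < n and s[i + 1] <= 0:
--         total += s[i] * s[i + 1]
--         i += 2
--     if i < n and s[i] <= 0:  # odd leftover non-positive (the largest one; 0 if any zero exists)
--         total += s[i]
--         i += 1
--     while i < n and s[i] == 1:  # ones are added directly
--         total += 1
--         i += 1
--     # remaining elements are all > 1, ascending: drop the smallest if odd, pair neighbours
--     if (n - i) % 2 == 1:
--         total += s[i]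
--         i += 1
--     while i < n:
--         total += s[i] * s[i + 1]
--         i += 2
--     return total
-- ===== Notes on version B (the rewrite author's own statement) =====
-- stated objective: alternative
-- what changed: B sorts the whole list once and makes one sweep over it (pair non-positives from the most negative end, add ones directly, pair the >1 elements dropping the smallest when odd), instead of A's split into two lists, two sorts and the redundant '0 in nums' membership scan.
import Mathlib
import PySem

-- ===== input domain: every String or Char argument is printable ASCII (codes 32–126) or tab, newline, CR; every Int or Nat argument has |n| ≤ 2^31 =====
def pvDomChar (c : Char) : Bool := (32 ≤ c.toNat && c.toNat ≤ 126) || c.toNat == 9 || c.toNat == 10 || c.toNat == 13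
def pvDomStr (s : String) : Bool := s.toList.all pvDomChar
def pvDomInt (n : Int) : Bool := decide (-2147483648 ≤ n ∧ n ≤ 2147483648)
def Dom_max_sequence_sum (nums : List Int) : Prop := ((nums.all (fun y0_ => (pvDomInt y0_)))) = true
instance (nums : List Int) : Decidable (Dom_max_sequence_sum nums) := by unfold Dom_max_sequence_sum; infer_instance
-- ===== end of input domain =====

-- B: one sort of the whole list and a single sweep instead of A's two lists, two sorts and
-- the redundant `0 in nums` scan; same O(n log n) cost, plainer shape (objective: alternative).

-- ===== PORT A =====
-- A's `while i < len-1 : result += l[i]*l[i+1]; i += 2` — sum of consecutive pairs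
def pvPairMulA : List Int → Int
  | a :: b :: rest => a * b + pvPairMulA rest
  | _ => 0

-- A's trailing `if i < len : l[i]` — the element left over when the length is odd
def pvLastOddA : List Int → Option Int
  | [] => none
  | [a] => some a
  | _ :: _ :: rest => pvLastOddA rest

-- A's `if i < len(positive): result += positive[i]`
def pvLeftAddA : Option Int → Int
  | some x => x
  | none => 0

-- A's trailing negative branch: `if 0 in nums: result += 0 else: result += negative[i]`
def pvLeftNegA (nums : List Int) : Option Int → Int
  | some x => if (0 : Int) ∈ nums then 0 else x
  | none => 0

def max_sequence_sum (nums : List Int) : Int :=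
  let st := nums.foldl
    (fun (st : List Int × List Int × Int) num =>
      if 1 < num then (st.1 ++ [num], st.2.1, st.2.2)
      else if num = 1 then (st.1, st.2.1, st.2.2 + 1)
      else (st.1, st.2.1 ++ [num], st.2.2)) ([], [], 0)
  let positive := PySem.List.sorted st.1 (fun x => x) true
  let negative := PySem.List.sorted st.2.1 (fun x => x) false
  let r1 := st.2.2 + pvPairMulA positive + pvLeftAddA (pvLastOddA positive)
  r1 + pvPairMulA negative + pvLeftNegA nums (pvLastOddA negative)

-- ===== PORT B =====
-- B's `while len(s) >= 2 and s[1] <= 0` loop: (sum added, remaining list)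
def pvNegPairsB : List Int → Int × List Int
  | a :: b :: rest =>
      if b ≤ 0 then
        let t := pvNegPairsB rest
        (a * b + t.1, t.2)
      else (0, a :: b :: rest)
  | s => (0, s)

-- B's `while s and s[0] == 1` loop: (number of ones consumed, remaining list)
def pvOnesB : List Int → Int × List Int
  | a :: rest =>
      if a = 1 then
        let t := pvOnesB rest
        (t.1 + 1, t.2)
      else (0, a :: rest)
  | [] => (0, [])

-- B's final `for k in range(0, len(s), 2)` pairing loop
def pvFwdPairsB : List Int → Int
  | a :: b :: rest => a * b + pvFwdPairsB rest
  | _ => 0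

-- B's `if s and s[0] <= 0` step: (added leftover, remaining list)
def pvLoB : List Int → Int × List Int
  | a :: rest => if a ≤ 0 then (a, rest) else (0, a :: rest)
  | [] => (0, [])

-- B's `if len(s) % 2 == 1` step: (added smallest element, remaining list)
def pvHdB (s : List Int) : Int × List Int :=
  if s.length % 2 = 1 then
    match s with
    | a :: rest => (a, rest)
    | [] => (0, [])
  else (0, s)

def max_sequence_sum_alt (nums : List Int) : Int :=
  let s0 := PySem.List.sorted nums (fun x => x) false
  let np := pvNegPairsB s0
  let lo := pvLoB np.2
  let op := pvOnesB lo.2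
  let hd := pvHdB op.2
  np.1 + lo.1 + op.1 + hd.1 + pvFwdPairsB hd.2

-- ===== PRECONDITION & SPEC =====
def Spec_max_sequence_sum (nums : List Int) (out : Int) : Prop := out = max_sequence_sum_alt nums
instance (nums : List Int) (out : Int) : Decidable (Spec_max_sequence_sum nums out) := by unfold Spec_max_sequence_sum; infer_instance

-- ===== CLAIM (what is proved, stated in full; the proofs are below) =====
def Claim_equal_max_sequence_sum : Prop := ∀ (nums : List Int), Dom_max_sequence_sum nums → Spec_max_sequence_sum nums (max_sequence_sum nums)

-- ===== LEMMAS AND PROOFS =====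

-- A's partition loop, characterised
theorem pvFoldA (l : List Int) (p n : List Int) (r : Int) :
    l.foldl
      (fun (st : List Int × List Int × Int) num =>
        if 1 < num then (st.1 ++ [num], st.2.1, st.2.2)
        else if num = 1 then (st.1, st.2.1, st.2.2 + 1)
        else (st.1, st.2.1 ++ [num], st.2.2)) (p, n, r)
    = (p ++ l.filter (fun x => decide (1 < x)),
       n ++ l.filter (fun x => decide (x ≤ 0)),
       r + (l.count 1 : Int)) := by
  induction l generalizing p n r with
  | nil => simp
  | cons x l ih =>
    simp only [List.foldl_cons]
    by_cases h1 : 1 < x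
    · rw [if_pos h1, ih]
      have hx0 : ¬ (x ≤ 0) := by omega
      have hx1 : ¬ (x = 1) := by omega
      simp [h1, hx0, hx1]
    · rw [if_neg h1]
      by_cases h2 : x = 1
      · rw [if_pos h2, ih]
        have hx0 : ¬ (x ≤ 0) := by omega
        simp [h2]
        ring
      · rw [if_neg h2, ih]
        have hx0 : x ≤ 0 := by omega
        simp [h1, hx0, h2]

-- the sorted input splits into the sorted non-positives, the ones, and the sorted >1 part
theorem pvSortedSplit (nums : List Int) :
    PySem.List.sorted nums (fun x => x) false
      = PySem.List.sorted (nums.filter (fun x => decide (x ≤ 0))) (fun x => x) false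
        ++ List.replicate (nums.count 1) 1
        ++ PySem.List.sorted (nums.filter (fun x => decide (1 < x))) (fun x => x) false := by
  apply PySem.List.sorted_id_eq_of_perm_of_pairwise
  · -- permutation
    rw [List.append_assoc]
    have hN := PySem.List.sorted_perm (nums.filter (fun x => decide (x ≤ 0))) (fun x => x) false
    have hQ := PySem.List.sorted_perm (nums.filter (fun x => decide (1 < x))) (fun x => x) false
    have hM : (List.replicate (nums.count 1) (1 : Int)) = nums.filter (fun x => x == 1) := (List.filter_beq (l := nums) 1).symm
    refine List.Perm.trans (List.Perm.append hN (List.Perm.trans (by rw [hM]) (List.Perm.refl _))) ?_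
    -- goal: filter ≤0 ++ (filter ==1 ++ Q) ~ nums
    refine List.Perm.trans (List.Perm.append (List.Perm.refl _) (List.Perm.append (List.Perm.refl _) hQ)) ?_
    have e1 : (nums.filter (fun x => !(decide (x ≤ 0)))).filter (fun x => x == 1) = nums.filter (fun x => x == 1) := by
      rw [List.filter_filter]
      apply List.filter_congr
      intro x _
      by_cases h0 : x ≤ 0 <;> by_cases h1 : x = 1 <;> simp [h0, h1]
    have e2 : (nums.filter (fun x => !(decide (x ≤ 0)))).filter (fun x => !(x == 1)) = nums.filter (fun x => decide (1 < x)) := by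
      rw [List.filter_filter]
      apply List.filter_congr
      intro x _
      rcases lt_trichotomy x 1 with h | h | h
      · have h0 : x ≤ 0 := by omega
        have h1 : ¬ (1 : Int) < x := by omega
        simp [h0, h1]
      · simp [h]
      · have h0 : ¬ x ≤ 0 := by omega
        have h1 : x ≠ 1 := by omega
        simp [h0, h1, h]
    have h2 : ((nums.filter (fun x => x == 1)) ++ (nums.filter (fun x => decide (1 < x)))).Perm (nums.filter (fun x => !(decide (x ≤ 0)))) := by
      rw [← e1, ← e2]
      exact List.filter_append_perm _ _
    refine List.Perm.trans (List.Perm.append (List.Perm.refl _) h2) ?_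
    exact List.filter_append_perm _ _
  · -- pairwise ≤
    rw [List.append_assoc]
    have memN : ∀ x ∈ PySem.List.sorted (nums.filter (fun x => decide (x ≤ 0))) (fun x => x) false, x ≤ 0 := by
      intro x hx
      rw [PySem.List.mem_sorted] at hx
      simpa using (List.mem_filter.mp hx).2
    have memQ : ∀ x ∈ PySem.List.sorted (nums.filter (fun x => decide (1 < x))) (fun x => x) false, 1 < x := by
      intro x hx
      rw [PySem.List.mem_sorted] at hx
      simpa using (List.mem_filter.mp hx).2
    rw [List.pairwise_append]
    refine ⟨PySem.List.sorted_pairwise _ _, ?_, ?_⟩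
    · rw [List.pairwise_append]
      refine ⟨List.pairwise_replicate.mpr (by simp), PySem.List.sorted_pairwise _ _, ?_⟩
      intro a ha b hb
      have := List.eq_of_mem_replicate ha
      have := memQ b hb
      omega
    · intro a ha b hb
      have ha0 := memN a ha
      rcases List.mem_append.mp hb with hb | hb
      · have := List.eq_of_mem_replicate hb
        omega
      · have := memQ b hb
        omega

-- descending sort = reverse of ascending sort (on Int values)
theorem pvSortedRevEq (l : List Int) :
    PySem.List.sorted l (fun x => x) true
      = (PySem.List.sorted l (fun x => x) false).reverse := by
  have h1 : (PySem.List.sorted l (fun x => x) true).reverse = PySem.List.sorted l (fun x => x) false :=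
    (((List.reverse_perm _).trans (PySem.List.sorted_perm _ _ _)).trans
        (PySem.List.sorted_perm _ _ _).symm).eq_of_pairwise
      (by intro a b _ _ _ _; omega)
      (List.pairwise_reverse.mpr (PySem.List.sorted_pairwise_rev _ _))
      (PySem.List.sorted_pairwise _ _)
  rw [← h1, List.reverse_reverse]

-- remainder of an even-length list after pairing two at a time: [] or the odd last element
def pvOddRest : List Int → List Int
  | _ :: _ :: rest => pvOddRest rest
  | s => s

theorem pvNegPairsB_append (N R : List Int) (hN : ∀ x ∈ N, x ≤ 0)
    (hR : ∀ y ∈ R, (1 : Int) ≤ y) :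
    pvNegPairsB (N ++ R) = (pvPairMulA N, pvOddRest N ++ R) := by
  induction N using pvOddRest.induct with
  | case1 a b rest ih =>
    have hb : b ≤ 0 := hN b (by simp)
    simp only [List.cons_append, pvNegPairsB, if_pos hb, pvOddRest, pvPairMulA]
    rw [ih (fun x hx => hN x (by simp [hx]))]
  | case2 s h =>
    match s, h with
    | [], _ =>
      simp only [List.nil_append, pvPairMulA, pvOddRest]
      cases R with
      | nil => rfl
      | cons a t =>
        cases t with
        | nil => rfl
        | cons b r =>
          have hb : ¬ (b ≤ 0) := by have := hR b (by simp); omega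
          simp [pvNegPairsB, hb]
    | [a], _ =>
      simp only [List.cons_append, List.nil_append, pvPairMulA, pvOddRest]
      cases R with
      | nil => rfl
      | cons b r =>
        have hb : ¬ (b ≤ 0) := by have := hR b (by simp); omega
        simp [pvNegPairsB, hb]
    | a :: b :: r, h => exact absurd rfl (h a b r)

theorem pvLastOddA_eq (N : List Int) : pvLastOddA N = (pvOddRest N).head? := by
  induction N using pvOddRest.induct with
  | case1 a b rest ih => simpa [pvLastOddA, pvOddRest] using ih
  | case2 s h =>
    match s, h with
    | [], _ => rfl
    | [a], _ => rfl
    | a :: b :: r, h => exact absurd rfl (h a b r)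

theorem pvOddRest_subset (N : List Int) : ∀ x ∈ pvOddRest N, x ∈ N := by
  induction N using pvOddRest.induct with
  | case1 a b rest ih =>
    intro x hx
    simp only [pvOddRest] at hx
    simp [ih x hx]
  | case2 s h => intro x hx; simpa [pvOddRest] using hx

theorem pvOddRest_max (N : List Int) (h : N.Pairwise (· ≤ ·)) :
    ∀ c ∈ pvOddRest N, ∀ x ∈ N, x ≤ c := by
  induction N using pvOddRest.induct with
  | case1 a b rest ih =>
    intro c hc x hx
    simp only [pvOddRest] at hc
    have hcr : c ∈ rest := pvOddRest_subset rest c hc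
    rcases List.pairwise_cons.mp h with ⟨ha, h2⟩
    rcases List.pairwise_cons.mp h2 with ⟨hb, h3⟩
    rcases List.mem_cons.mp hx with rfl | hx2
    · exact ha c (by simp [hcr])
    · rcases List.mem_cons.mp hx2 with rfl | hx3
      · exact hb c hcr
      · exact ih h3 c hc x hx3
  | case2 s hs =>
    match s, hs with
    | [], _ => intro c hc; simp [pvOddRest] at hc
    | [a], _ =>
      intro c hc x hx
      simp only [pvOddRest] at hc
      simp at hc hx
      omega
    | a :: b :: r, hs => exact absurd rfl (hs a b r)

theorem pvOnesB_ones (k : Nat) (Q : List Int) (hQ : ∀ y ∈ Q, 1 < y) :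
    pvOnesB (List.replicate k 1 ++ Q) = ((k : Int), Q) := by
  induction k with
  | zero =>
    simp only [List.replicate, List.nil_append]
    cases Q with
    | nil => rfl
    | cons a r =>
      have : ¬ (a = 1) := by have := hQ a (by simp); omega
      simp [pvOnesB, this]
  | succ k ih =>
    rw [List.replicate_succ, List.cons_append]
    show (if (1 : Int) = 1 then ((pvOnesB (List.replicate k 1 ++ Q)).1 + 1, (pvOnesB (List.replicate k 1 ++ Q)).2) else _) = _
    rw [if_pos rfl, ih]
    norm_cast

theorem pvPairMulA_append (X Y : List Int) (h : X.length % 2 = 0) :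
    pvPairMulA (X ++ Y) = pvPairMulA X + pvPairMulA Y := by
  induction X using pvOddRest.induct with
  | case1 a b rest ih =>
    simp only [List.cons_append, pvPairMulA]
    rw [ih (by simp only [List.length_cons] at h; omega)]
    ring
  | case2 s hs =>
    match s, hs with
    | [], _ => simp [pvPairMulA]
    | [a], _ => simp at h
    | a :: b :: r, hs => exact absurd rfl (hs a b r)

theorem pvLastOddA_append (X Y : List Int) (h : X.length % 2 = 0) :
    pvLastOddA (X ++ Y) = pvLastOddA Y := by
  induction X using pvOddRest.induct with
  | case1 a b rest ih =>
    simp only [List.cons_append, pvLastOddA]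
    exact ih (by simp only [List.length_cons] at h; omega)
  | case2 s hs =>
    match s, hs with
    | [], _ => rfl
    | [a], _ => simp at h
    | a :: b :: r, hs => exact absurd rfl (hs a b r)

theorem pvPairMulA_reverse_even (Q : List Int) (h : Q.length % 2 = 0) :
    pvPairMulA Q.reverse = pvFwdPairsB Q := by
  induction Q using pvOddRest.induct with
  | case1 a b rest ih =>
    have hrev : (a :: b :: rest).reverse = rest.reverse ++ [b, a] := by
      simp
    have hlen : rest.reverse.length % 2 = 0 := by
      simp only [List.length_reverse]
      simp only [List.length_cons] at h
      omega
    rw [hrev, pvPairMulA_append _ _ hlen, ih (by simp only [List.length_cons] at h; omega)]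
    simp only [pvPairMulA, pvFwdPairsB]
    ring
  | case2 s hs =>
    match s, hs with
    | [], _ => rfl
    | [a], _ => simp at h
    | a :: b :: r, hs => exact absurd rfl (hs a b r)

theorem pvOddRest_shape (N : List Int) : pvOddRest N = [] ∨ ∃ c, pvOddRest N = [c] := by
  induction N using pvOddRest.induct with
  | case1 a b rest ih => simpa [pvOddRest] using ih
  | case2 s h =>
    match s, h with
    | [], _ => left; rfl
    | [a], _ => right; exact ⟨a, rfl⟩
    | a :: b :: r, h => exact absurd rfl (h a b r)

theorem pvLastOddA_even (X : List Int) (h : X.length % 2 = 0) : pvLastOddA X = none := by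
  have := pvLastOddA_append X [] h
  simpa [pvLastOddA] using this

theorem pvLoB_pos (L : List Int) (hL : ∀ y ∈ L, (1 : Int) ≤ y) : pvLoB L = (0, L) := by
  cases L with
  | nil => rfl
  | cons a rest =>
    have : ¬ (a ≤ 0) := by have := hL a (by simp); omega
    simp [pvLoB, this]

-- the positive phase: A's descending pairing = B's ascending pairing with the smallest dropped
theorem pvPosPhase (Q : List Int) :
    pvPairMulA Q.reverse + pvLeftAddA (pvLastOddA Q.reverse)
      = (pvHdB Q).1 + pvFwdPairsB (pvHdB Q).2 := by
  by_cases hq : Q.length % 2 = 1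
  · cases Q with
    | nil => simp at hq
    | cons q0 Q' =>
      have hQ' : Q'.length % 2 = 0 := by simp only [List.length_cons] at hq; omega
      have hrev : Q'.reverse.length % 2 = 0 := by simpa using hQ'
      rw [List.reverse_cons, pvPairMulA_append _ _ hrev, pvLastOddA_append _ _ hrev,
        pvPairMulA_reverse_even Q' hQ']
      simp only [pvPairMulA, pvLastOddA, pvLeftAddA, pvHdB, hq, if_pos]
      ring
  · have hQ : Q.length % 2 = 0 := by omega
    have hrev : Q.reverse.length % 2 = 0 := by simpa using hQ
    rw [pvPairMulA_reverse_even Q hQ, pvLastOddA_even _ hrev]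
    simp [pvHdB, hq, pvLeftAddA]

-- ===== VERDICT (by name: the statement is the Claim_ definition above) =====
theorem max_sequence_sum_spec : Claim_equal_max_sequence_sum := by
  intro nums _
  unfold Spec_max_sequence_sum
  set N := PySem.List.sorted (nums.filter (fun x => decide (x ≤ 0))) (fun x => x) false with hN
  set Q := PySem.List.sorted (nums.filter (fun x => decide (1 < x))) (fun x => x) false with hQ
  set k := nums.count 1 with hk
  have memN : ∀ x ∈ N, x ≤ 0 := by
    intro x hx
    rw [hN, PySem.List.mem_sorted] at hx
    simpa using (List.mem_filter.mp hx).2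
  have memQ : ∀ x ∈ Q, 1 < x := by
    intro x hx
    rw [hQ, PySem.List.mem_sorted] at hx
    simpa using (List.mem_filter.mp hx).2
  have hA : max_sequence_sum nums
      = (k : Int) + pvPairMulA Q.reverse + pvLeftAddA (pvLastOddA Q.reverse)
        + (pvPairMulA N + pvLeftNegA nums (pvLastOddA N)) := by
    simp only [max_sequence_sum]
    rw [pvFoldA]
    simp only [List.nil_append]
    rw [pvSortedRevEq, ← hN, ← hQ, ← hk]
    ring
  have hsplit : PySem.List.sorted nums (fun x => x) false
      = N ++ (List.replicate k 1 ++ Q) := by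
    rw [← List.append_assoc, hN, hQ, hk]
    exact pvSortedSplit nums
  have hR1 : ∀ y ∈ List.replicate k (1 : Int) ++ Q, (1 : Int) ≤ y := by
    intro y hy
    rcases List.mem_append.mp hy with h | h
    · simp [List.eq_of_mem_replicate h]
    · have := memQ y h; omega
  have hnp := pvNegPairsB_append N (List.replicate k 1 ++ Q) memN hR1
  have key : pvLoB (pvOddRest N ++ (List.replicate k 1 ++ Q))
      = (pvLeftNegA nums (pvLastOddA N), List.replicate k 1 ++ Q) := by
    rcases pvOddRest_shape N with ho | ⟨c, ho⟩
    · rw [ho, List.nil_append, pvLoB_pos _ hR1, pvLastOddA_eq, ho]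
      simp [pvLeftNegA]
    · have hc : c ∈ N := pvOddRest_subset N c (by rw [ho]; simp)
      have hc0 : c ≤ 0 := memN c hc
      rw [ho, List.cons_append, pvLastOddA_eq, ho]
      simp only [pvLoB, if_pos hc0, List.head?, pvLeftNegA]
      by_cases hz : (0 : Int) ∈ nums
      · have h0N : (0 : Int) ∈ N := by
          rw [hN, PySem.List.mem_sorted]
          simp [List.mem_filter, hz]
        have hmax : (0 : Int) ≤ c := by
          have hpw : N.Pairwise (· ≤ ·) := by
            rw [hN]; exact PySem.List.sorted_pairwise _ _
          exact pvOddRest_max N hpw c (by rw [ho]; simp) 0 h0N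
        have : c = 0 := by omega
        simp [hz, this]
      · simp [hz]
  have hones := pvOnesB_ones k Q memQ
  rw [hA]
  simp only [max_sequence_sum_alt]
  rw [hsplit, hnp]
  simp only []
  rw [key]
  simp only []
  rw [hones]
  simp only []
  linear_combination pvPosPhase Q
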